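-- pv_equiv track=rewrite | github.com/kira-1011/A2SV | numberReplacement.py | replaceNumbers
-- ===== SOURCE A (Python) =====
-- from collections import defaultdict
--
-- def replaceNumbers(nums, letters):
--
--     # Intialize all needed variables
--     index_map = defaultdict(list)
--     # replaced = [""] * arr_len
--
--     # store the value as key and list of its occurence indices as value
--     for index, num in enumerate(nums):
--         index_map[num].append(index)
--
--     # replace
--     for index, letter in enumerate(letters):
--         number = nums[index]
--         indices = index_map[number]
--
--         for num_index in indices:
--             nums[num_index] = letter
--
--     nums = "".join(nums)
--     return nums
-- ===== SOURCE B (Python) =====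
-- def replaceNumbers(nums, letters):
--     # Map each number string to the letter at its first occurrence, then
--     # rewrite every position in one pass (mutating nums in place, like the
--     # original, before joining).
--     first = {}
--     for i, letter in enumerate(letters):
--         first.setdefault(nums[i], letter)
--     for i in range(len(nums)):
--         nums[i] = first.get(nums[i], nums[i])
--     return "".join(nums)
-- ===== Notes on version B (the rewrite author's own statement) =====
-- stated objective: faster
-- what changed: B replaces A's value-to-index-list dict with nested group-broadcast writes by a value-to-first-letter dict and one direct pass over the list; Pre_ excludes inputs where letters is longer than nums (A raises IndexError) and inputs where a replacement letter string also occurs among the number strings, where A's later reads see its earlier in-place writes and the sequential and the groupwise result are both defensible.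
-- outside the precondition, e.g. on replaceNumbers(['1', '1', '2'], ['2', 'b', 'c']): A returns '22b', B returns '22c'
import Mathlib
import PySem

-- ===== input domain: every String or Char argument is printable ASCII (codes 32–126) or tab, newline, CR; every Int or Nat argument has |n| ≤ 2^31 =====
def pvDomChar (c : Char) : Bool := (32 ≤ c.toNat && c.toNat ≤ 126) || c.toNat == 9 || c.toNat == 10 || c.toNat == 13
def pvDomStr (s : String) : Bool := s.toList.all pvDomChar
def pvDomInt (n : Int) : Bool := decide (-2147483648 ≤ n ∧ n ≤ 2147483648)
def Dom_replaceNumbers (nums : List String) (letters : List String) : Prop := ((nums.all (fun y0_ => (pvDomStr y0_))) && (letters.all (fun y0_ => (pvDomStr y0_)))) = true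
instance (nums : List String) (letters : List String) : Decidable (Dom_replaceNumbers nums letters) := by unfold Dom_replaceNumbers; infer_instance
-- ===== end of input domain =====

-- B maps each number string to the letter at its first occurrence and rewrites the list in
-- one pass, instead of A's value→index-list dict with per-letter group-broadcast writes.
-- Return-value equivalence only (both Pythons mutate the nums list in place).

-- ===== PORT A =====
-- index_map = defaultdict(list); for index, num in enumerate(nums): index_map[num].append(index)
def replaceNumbersIm (nums : List String) : PySem.Dict String (List Int) :=
  (PySem.List.enumerate nums 0).foldl (fun d p => d.modify p.2 [] (· ++ [p.1])) PySem.Dict.empty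

-- for index, letter in enumerate(letters): number = nums[index]; for num_index in index_map[number]: nums[num_index] = letter
-- (none = the IndexError of nums[index]; indices written by the inner loop are always in range)
def replaceNumbersLoop (im : PySem.Dict String (List Int)) :
    List (Int × String) → List String → Option (List String)
  | [], ns => some ns
  | (index, letter) :: rest, ns =>
    match PySem.List.pyGet? ns index with
    | none => none
    | some number =>
      replaceNumbersLoop im rest
        ((im.getD number []).foldl (fun acc i => PySem.List.pySetD acc i letter) ns)

def replaceNumbers (nums : List String) (letters : List String) : String :=
  match replaceNumbersLoop (replaceNumbersIm nums) (PySem.List.enumerate letters 0) nums with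
  | some ns => PySem.Str.join "" ns
  | none => ""   -- unreachable under Pre_ (IndexError)

-- ===== PORT B =====
-- first = {}; for i, letter in enumerate(letters): first.setdefault(nums[i], letter)
-- (none = the IndexError of nums[i])
def replaceNumbersAltFirst (nums : List String) :
    List (Int × String) → PySem.Dict String String → Option (PySem.Dict String String)
  | [], d => some d
  | (i, letter) :: rest, d =>
    match PySem.List.pyGet? nums i with
    | none => none
    | some v => replaceNumbersAltFirst nums rest (d.setdefault v letter)

def replaceNumbers_alt (nums : List String) (letters : List String) : String :=
  match replaceNumbersAltFirst nums (PySem.List.enumerate letters 0) PySem.Dict.empty with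
  | none => ""   -- unreachable under Pre_ (IndexError)
  | some first =>
    -- for i in range(len(nums)): nums[i] = first.get(nums[i], nums[i]); return "".join(nums)
    PySem.Str.join ""
      ((PySem.List.pyRange 0 (nums.length : Int) 1).foldl
        (fun acc i => PySem.List.pySetD acc i
          (first.getD (PySem.List.pyGetD acc i "") (PySem.List.pyGetD acc i ""))) nums)

-- ===== PRECONDITION & SPEC =====
-- Pre_ excludes (a) letters longer than nums, where A raises IndexError at nums[index], and
-- (b) inputs where a replacement letter string also occurs among the number strings: there A's
-- later reads of nums[index] see its own earlier in-place writes, and the sequential value A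
-- returns and the groupwise first-occurrence value are both defensible readings of the task.
def Pre_replaceNumbers (nums : List String) (letters : List String) : Prop :=
  letters.length ≤ nums.length ∧ ∀ l ∈ letters, l ∉ nums
instance (nums : List String) (letters : List String) : Decidable (Pre_replaceNumbers nums letters) := by
  unfold Pre_replaceNumbers; infer_instance
def pvWitness_replaceNumbers : List String × List String := (["1", "2", "1"], ["a", "b", "c"])

def Spec_replaceNumbers (nums : List String) (letters : List String) (out : String) : Prop := out = replaceNumbers_alt nums letters
instance (nums : List String) (letters : List String) (out : String) : Decidable (Spec_replaceNumbers nums letters out) := by unfold Spec_replaceNumbers; infer_instance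

-- ===== CLAIM (what is proved, stated in full; the proofs are below) =====
def Claim_equal_replaceNumbers : Prop := ∀ (nums : List String) (letters : List String), Dom_replaceNumbers nums letters → Pre_replaceNumbers nums letters → Spec_replaceNumbers nums letters (replaceNumbers nums letters)

-- ===== LEMMAS AND PROOFS =====

-- ---- facts about A's index map (value → list of its occurrence indices) ----
theorem pvIm_getD (nums : List String) (v : String) :
    (replaceNumbersIm nums).getD v [] =
      (((PySem.List.enumerate nums 0).map Prod.swap).filter (fun p => p.1 == v)).map (·.2) := by
  have h : replaceNumbersIm nums = ((PySem.List.enumerate nums 0).map Prod.swap).foldl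
      (fun d p => d.modify p.1 [] (· ++ [p.2])) PySem.Dict.empty := by
    unfold replaceNumbersIm; rw [List.foldl_map]; rfl
  rw [h, PySem.Dict.getD_foldl_modify_append]
  simp

theorem pvIm_mem (nums : List String) (v : String) (i : Int) :
    i ∈ (replaceNumbersIm nums).getD v [] ↔
      ∃ (k : Nat), ∃ (_ : k < nums.length), i = (k : Int) ∧ nums[k] = v := by
  rw [pvIm_getD]
  simp only [List.mem_map, List.mem_filter, PySem.List.mem_enumerate_iff, beq_iff_eq]
  constructor
  · rintro ⟨p, ⟨⟨q, ⟨k, hk, rfl⟩, rfl⟩, hv⟩, rfl⟩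
    refine ⟨k, hk, by simp, by simpa using hv⟩
  · rintro ⟨k, hk, rfl, hv⟩
    exact ⟨((0 + (k:Int), nums[k]) : Int × String).swap, ⟨⟨(0+(k:Int), nums[k]), ⟨k, hk, rfl⟩, rfl⟩, by simpa using hv⟩, by simp⟩

theorem pvIm_not_mem (nums : List String) (v : String) (hv : v ∉ nums) :
    (replaceNumbersIm nums).getD v [] = [] := by
  rw [pvIm_getD, List.filter_eq_nil_iff.2, List.map_nil]
  rintro p hp
  simp only [List.mem_map, PySem.List.mem_enumerate_iff] at hp
  obtain ⟨q, ⟨k, hk, rfl⟩, rfl⟩ := hp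
  simp only [Prod.swap_prod_mk, beq_iff_eq]
  intro h; exact hv (h ▸ List.getElem_mem hk)

theorem pvSetFold_length (I : List Int) (letter : String) (ns : List String) :
    (I.foldl (fun acc i => PySem.List.pySetD acc i letter) ns).length = ns.length := by
  induction I generalizing ns with
  | nil => rfl
  | cons i I ih => simp [List.foldl_cons, ih, PySem.List.length_pySetD]

theorem pvSetFold_getElem (I : List Int) (letter : String) (ns : List String)
    (hnn : ∀ i ∈ I, 0 ≤ i) (p : Nat) (hp : p < ns.length) :
    (I.foldl (fun acc i => PySem.List.pySetD acc i letter) ns)[p]'(by rw [pvSetFold_length]; exact hp)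
      = if ((p : Int) ∈ I) then letter else ns[p] := by
  induction I generalizing ns with
  | nil => simp
  | cons i I ih =>
    have h0 : (0:Int) ≤ i := hnn i (by simp)
    have hset : PySem.List.pySetD ns i letter = ns.set i.toNat letter :=
      PySem.List.pySetD_of_nonneg ns letter h0
    simp only [List.foldl_cons]
    rw [ih (PySem.List.pySetD ns i letter) (fun j hj => hnn j (List.mem_cons_of_mem _ hj)) (by simp [hset, hp])]
    by_cases hmem : (p:Int) ∈ I
    · simp [hmem]
    · rw [if_neg hmem]; simp only [hset, List.getElem_set]
      by_cases hip : i = (p:Int)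
      · rw [if_pos (by omega), if_pos (by simp [List.mem_cons, hip.symm])]
      · have hnc : ¬ ((p:Int) ∈ i :: I) := by
          intro hc
          rcases List.mem_cons.mp hc with h | h
          · exact hip h.symm
          · exact hmem h
        rw [if_neg (by omega), if_neg hnc]

-- the whole inner write loop of A, pointwise: every position of value v gets the letter
theorem pvGroupWrite (nums : List String) (v letter : String) (ns : List String)
    (hns : ns.length = nums.length) (p : Nat) (hp : p < nums.length) :
    (((replaceNumbersIm nums).getD v []).foldl
        (fun acc i => PySem.List.pySetD acc i letter) ns)[p]'(by rw [pvSetFold_length]; omega)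
      = if nums[p] = v then letter else ns[p]'(by omega) := by
  have hnn : ∀ i ∈ (replaceNumbersIm nums).getD v [], 0 ≤ i := by
    intro i hi
    obtain ⟨q, hq, rfl, _⟩ := (pvIm_mem nums v i).mp hi
    positivity
  rw [pvSetFold_getElem _ letter ns hnn p (by omega)]
  congr 1
  rw [eq_iff_iff]
  constructor
  · intro hm
    obtain ⟨q, hq, hiq, hv⟩ := (pvIm_mem nums v _).mp hm
    have hqp : q = p := by exact_mod_cast hiq.symm
    subst hqp
    exact hv
  · intro hv
    exact (pvIm_mem nums v _).mpr ⟨p, hp, rfl, hv⟩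

-- ---- small facts about idxOf ----
theorem pvIdxOf_le (l : List String) (k : Nat) (hk : k < l.length) : l.idxOf l[k] ≤ k := by
  induction l generalizing k with
  | nil => simp at hk
  | cons x xs ih =>
    cases k with
    | zero => simp
    | succ k =>
      have hk' : k < xs.length := by simpa using Nat.lt_of_succ_lt_succ hk
      simp only [List.getElem_cons_succ]
      by_cases hx : x = xs[k]'hk'
      · simp [hx]
      · rw [List.idxOf_cons_ne _ (by simpa using hx)]
        have := ih k hk'
        omega

theorem pvIdxOf_getElem (l : List String) (v : String) (h : v ∈ l) :
    l[l.idxOf v]'(List.idxOf_lt_length_of_mem h) = v := by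
  simpa using List.getElem_idxOf (l := l) (List.idxOf_lt_length_of_mem h)

theorem pvIdxOf_mem (l : List String) (v : String) (h : l.idxOf v < l.length) : v ∈ l := by
  by_contra hv
  rw [List.idxOf_eq_length_iff.mpr hv] at h
  omega

theorem pvIdxOf_eq (l : List String) (v : String) (k : Nat) (hk : k < l.length)
    (h : l.idxOf v = k) : l[k] = v := by
  have hm : v ∈ l := pvIdxOf_mem l v (by omega)
  have h1 : l[l.idxOf v]? = some v := by
    rw [List.getElem?_eq_getElem (List.idxOf_lt_length_of_mem hm)]
    exact congrArg some (pvIdxOf_getElem l v hm)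
  rw [h, List.getElem?_eq_getElem hk] at h1
  exact Option.some.inj h1

-- one step of A's replacement loop, with the index read resolved
theorem replaceNumbersLoop_cons (im : PySem.Dict String (List Int)) (i : Int) (letter : String)
    (rest : List (Int × String)) (ns : List String) (v : String)
    (h : PySem.List.pyGet? ns i = some v) :
    replaceNumbersLoop im ((i, letter) :: rest) ns =
      replaceNumbersLoop im rest
        ((im.getD v []).foldl (fun acc j => PySem.List.pySetD acc j letter) ns) := by
  simp only [replaceNumbersLoop, h]

-- the value A's run leaves at position p, under Pre_
def pvAVal (nums letters : List String) (p : Nat) (hp : p < nums.length) : String :=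
  if nums.idxOf nums[p] < letters.length then letters.getD (nums.idxOf nums[p]) "" else nums[p]

-- A's replacement loop, characterized pointwise under disjointness
theorem pvALoop (nums letters : List String)
    (hlen : letters.length ≤ nums.length) (hdisj : ∀ l ∈ letters, l ∉ nums) :
    ∀ (suf : List String) (k : Nat) (ns : List String),
      letters.drop k = suf →
      ∀ (hns : ns.length = nums.length),
      (∀ (p : Nat) (hp : p < nums.length),
        ns[p]'(by omega) = if nums.idxOf nums[p] < k then letters.getD (nums.idxOf nums[p]) "" else nums[p]) →
      k ≤ letters.length →
      ∃ final,
        replaceNumbersLoop (replaceNumbersIm nums) (PySem.List.enumerate suf (k : Int)) ns = some final ∧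
        ∃ (hf : final.length = nums.length),
        ∀ (p : Nat) (hp : p < nums.length), final[p]'(by omega) = pvAVal nums letters p hp := by
  intro suf
  induction suf with
  | nil =>
    intro k ns hdrop hns hinv hk
    have hkl : letters.length ≤ k := by
      have := List.drop_eq_nil_iff.mp hdrop
      omega
    have hke : k = letters.length := le_antisymm hk hkl
    refine ⟨ns, rfl, hns, ?_⟩
    intro p hp
    rw [hinv p hp, hke]
    rfl
  | cons letter rest ih =>
    intro k ns hdrop hns hinv hk
    have hkl : k < letters.length := by
      by_contra h
      rw [List.drop_eq_nil_iff.mpr (by omega)] at hdrop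
      exact (List.cons_ne_nil letter rest) hdrop.symm
    have hcons : letters[k] :: letters.drop (k + 1) = letter :: rest := by
      rw [← List.drop_eq_getElem_cons hkl, hdrop]
    have hletter : letters[k] = letter := by injection hcons
    have hrest : letters.drop (k + 1) = rest := by injection hcons
    have hkn : k < nums.length := by omega
    rw [PySem.List.enumerate_cons]
    have hget : PySem.List.pyGet? ns (k : Int) = some (ns[k]'(by omega)) := by
      rw [PySem.List.pyGet?_natCast, List.getElem?_eq_getElem (by omega)]
    rw [replaceNumbersLoop_cons _ _ _ _ _ _ hget]
    have hcast : ((k : Int) + 1) = ((k + 1 : Nat) : Int) := by push_cast; ring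
    rw [hcast]
    have hle : nums.idxOf (nums[k]'hkn) ≤ k := pvIdxOf_le nums k hkn
    by_cases hc : nums.idxOf (nums[k]'hkn) < k
    · -- position k was already replaced by a letter; letters never occur in nums, so no-op
      have hval : ns[k]'(by omega) = letters.getD (nums.idxOf (nums[k]'hkn)) "" := by
        rw [hinv k hkn, if_pos hc]
      have hmem : ns[k]'(by omega) ∈ letters := by
        rw [hval, List.getD_eq_getElem _ _ (by omega)]
        exact List.getElem_mem _
      have hnot : ns[k]'(by omega) ∉ nums := hdisj _ hmem
      rw [pvIm_not_mem nums _ hnot, List.foldl_nil]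
      apply ih (k + 1) ns hrest hns _ (by omega)
      intro p hp
      rw [hinv p hp]
      have hne : nums.idxOf nums[p] ≠ k := by
        intro heq
        have he : nums[k]'hkn = nums[p]'hp := pvIdxOf_eq nums _ k hkn heq
        rw [he] at hc
        omega
      by_cases hlt : nums.idxOf nums[p] < k
      · rw [if_pos hlt, if_pos (by omega)]
      · rw [if_neg hlt, if_neg (by omega)]
    · -- position k still holds its original value, whose first occurrence is k: group write
      have hck : nums.idxOf (nums[k]'hkn) = k := by omega
      have hval : ns[k]'(by omega) = nums[k]'hkn := by
        rw [hinv k hkn, if_neg hc]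
      have hinv' : ∀ (p : Nat) (hp : p < nums.length),
          ((((replaceNumbersIm nums).getD (ns[k]'(by omega)) []).foldl
            (fun acc i => PySem.List.pySetD acc i letter) ns)[p]'(by rw [pvSetFold_length]; omega))
          = if nums.idxOf nums[p] < k + 1 then letters.getD (nums.idxOf nums[p]) "" else nums[p] := by
        intro p hp
        rw [pvGroupWrite nums _ letter ns hns p hp]
        by_cases hv : nums[p]'hp = ns[k]'(by omega)
        · have hidx : nums.idxOf (nums[p]'hp) = k := by rw [hv, hval, hck]
          rw [if_pos hv, if_pos (by omega), hidx,
            List.getD_eq_getElem _ _ (by omega), hletter]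
        · have hne : nums.idxOf (nums[p]'hp) ≠ k := by
            intro heq
            exact hv ((pvIdxOf_eq nums _ k hkn heq).symm.trans hval.symm)
          rw [if_neg hv, hinv p hp]
          by_cases hlt : nums.idxOf (nums[p]'hp) < k
          · rw [if_pos hlt, if_pos (by omega)]
          · rw [if_neg hlt, if_neg (by omega)]
      exact ih (k + 1) _ hrest (by rw [pvSetFold_length]; exact hns) hinv' (by omega)

-- B's first-pass dict, characterized: value v is a key iff its first occurrence in nums lies
-- below the processed prefix, and its entry is the letter at that first occurrence
theorem pvBFirst (nums letters : List String) (hlen : letters.length ≤ nums.length) :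
    ∀ (suf : List String) (k : Nat) (d : PySem.Dict String String),
      letters.drop k = suf → k ≤ letters.length →
      (∀ v, d.get? v = if nums.idxOf v < k then some (letters.getD (nums.idxOf v) "") else none) →
      ∃ F, replaceNumbersAltFirst nums (PySem.List.enumerate suf (k : Int)) d = some F ∧
        ∀ v, F.get? v = if nums.idxOf v < letters.length then some (letters.getD (nums.idxOf v) "") else none := by
  intro suf
  induction suf with
  | nil =>
    intro k d hdrop hk hinv
    have hkl : letters.length ≤ k := by
      have := List.drop_eq_nil_iff.mp hdrop
      omega
    have hke : k = letters.length := le_antisymm hk hkl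
    subst hke
    exact ⟨d, rfl, hinv⟩
  | cons letter rest ih =>
    intro k d hdrop hk hinv
    have hkl : k < letters.length := by
      by_contra h
      rw [List.drop_eq_nil_iff.mpr (by omega)] at hdrop
      exact (List.cons_ne_nil letter rest) hdrop.symm
    have hcons : letters[k] :: letters.drop (k + 1) = letter :: rest := by
      rw [← List.drop_eq_getElem_cons hkl, hdrop]
    have hletter : letters[k] = letter := by injection hcons
    have hrest : letters.drop (k + 1) = rest := by injection hcons
    have hkn : k < nums.length := by omega
    rw [PySem.List.enumerate_cons]
    simp only [replaceNumbersAltFirst]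
    have hget : PySem.List.pyGet? nums (k : Int) = some (nums[k]'hkn) := by
      rw [PySem.List.pyGet?_natCast, List.getElem?_eq_getElem hkn]
    rw [hget]
    have hcast : ((k : Int) + 1) = ((k + 1 : Nat) : Int) := by push_cast; ring
    rw [hcast]
    apply ih (k + 1) _ hrest (by omega)
    intro v
    by_cases hv : v = nums[k]'hkn
    · subst hv
      rw [PySem.Dict.get?_setdefault_self, hinv]
      have hle : nums.idxOf (nums[k]'hkn) ≤ k := pvIdxOf_le nums k hkn
      by_cases hlt : nums.idxOf (nums[k]'hkn) < k
      · rw [if_pos hlt, if_pos (by omega)]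
        rfl
      · have heq : nums.idxOf (nums[k]'hkn) = k := by omega
        rw [if_neg hlt, if_pos (by omega), heq]
        rw [List.getD_eq_getElem _ _ (by omega), hletter]
        rfl
    · rw [PySem.Dict.get?_setdefault_of_ne _ _ hv, hinv]
      have hne : nums.idxOf v ≠ k := fun heq =>
        hv (pvIdxOf_eq nums v k hkn heq).symm
      by_cases hlt : nums.idxOf v < k
      · rw [if_pos hlt, if_pos (by omega)]
      · rw [if_neg hlt, if_neg (by omega)]

-- B's second pass: the in-place rewrite over range(len(nums)) is the pointwise map
theorem pvBSecond (nums : List String) (F : PySem.Dict String String) :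
    ∀ (n m : Nat) (acc : List String),
      nums.length - m = n →
      ∀ (hacc : acc.length = nums.length),
      (∀ (p : Nat) (hp : p < nums.length),
        acc[p]'(by omega) = if p < m then F.getD (nums[p]) (nums[p]) else nums[p]) →
      ((PySem.List.pyRange (m : Int) (nums.length : Int) 1).foldl
        (fun acc i => PySem.List.pySetD acc i
          (F.getD (PySem.List.pyGetD acc i "") (PySem.List.pyGetD acc i ""))) acc)
        = nums.map (fun v => F.getD v v) := by
  intro n
  induction n with
  | zero =>
    intro m acc hfuel hacc hinv
    have hm : nums.length ≤ m := by omega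
    rw [PySem.List.pyRange_one_eq_nil (by exact_mod_cast hm), List.foldl_nil]
    apply List.ext_getElem (by simp [hacc])
    intro p hp hp'
    rw [List.getElem_map, hinv p (by omega), if_pos (by omega)]
  | succ n ih =>
    intro m acc hfuel hacc hinv
    have hm : m < nums.length := by omega
    rw [PySem.List.pyRange_one_cons (by exact_mod_cast hm), List.foldl_cons]
    have hgm : PySem.List.pyGetD acc (m : Int) "" = nums[m] := by
      rw [PySem.List.pyGetD_natCast, List.getD_eq_getElem _ _ (by omega), hinv m hm,
        if_neg (by omega)]
    rw [hgm, PySem.List.pySetD_natCast]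
    have hcast : ((m : Int) + 1) = ((m + 1 : Nat) : Int) := by push_cast; ring
    rw [hcast]
    apply ih (m + 1) _ (by omega) (by simp [hacc])
    intro p hp
    rw [List.getElem_set]
    by_cases hpm : m = p
    · subst hpm; rw [if_pos rfl, if_pos (by omega)]
    · rw [if_neg hpm, hinv p hp]
      by_cases hlt : p < m
      · rw [if_pos hlt, if_pos (by omega)]
      · rw [if_neg hlt, if_neg (by omega)]

-- ===== VERDICT (by name: the statement is the Claim_ definition above) =====
theorem replaceNumbers_spec : Claim_equal_replaceNumbers := by
  intro nums letters _hdom hpre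
  obtain ⟨hlen, hdisj⟩ := hpre
  unfold Spec_replaceNumbers
  obtain ⟨final, hrunA, hf, hfp⟩ :=
    pvALoop nums letters hlen hdisj letters 0 nums (by simp) rfl
      (by intro p hp; rw [if_neg (by omega)]) (by omega)
  obtain ⟨F, hrunB, hFv⟩ :=
    pvBFirst nums letters hlen letters 0 PySem.Dict.empty (by simp) (by omega)
      (by intro v; rw [PySem.Dict.get?_empty, if_neg (by omega)])
  rw [Nat.cast_zero] at hrunA hrunB
  unfold replaceNumbers replaceNumbers_alt
  rw [hrunA, hrunB]
  have hsecond := pvBSecond nums F nums.length 0 nums (by omega) rfl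
    (by intro p hp; rw [if_neg (by omega)])
  rw [Nat.cast_zero] at hsecond
  simp only [hsecond]
  congr 1
  apply List.ext_getElem (by simp [hf])
  intro p hp hp'
  rw [List.getElem_map, hfp p (by omega), pvAVal]
  have hgd : F.getD (nums[p]'(by omega)) (nums[p]'(by omega))
      = (F.get? (nums[p]'(by omega))).getD (nums[p]'(by omega)) :=
    PySem.Dict.getD_eq_get?_getD _ _ _
  rw [hgd, hFv]
  by_cases hlt : nums.idxOf (nums[p]'(by omega)) < letters.length
  · simp [hlt]
  · simp [hlt]
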